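-- pv_equiv track=rewrite | github.com/jinnnii/coding-test-py | KEJ/week7/안전지대.py | solution
-- ===== SOURCE A (Python) =====
-- direct = [(0,1),(0,-1),(1,0),(-1,0),(1,1),(-1,-1),(-1,1),(1,-1)]
--
-- def solution(board):
--     maps = [[0]*len(board) for _ in range(len(board))]
--     for idx1, val1 in enumerate(board):
--         for idx2, val2 in enumerate(val1):
--             if val2 ==1:
--                 maps[idx1][idx2] =1
--                 for d in direct:
--                     nidx1, nidx2 = idx1+d[0], idx2+d[1]
--                     if nidx1 in range(len(board)) and nidx2 in range(len(board)):
--                         maps[nidx1][nidx2] = 1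
--     return sum(maps,[]).count(0)
-- ===== SOURCE B (Python) =====
-- def solution(board):
--     n = len(board)
--     offs = [(0, 1), (0, -1), (1, 0), (-1, 0), (1, 1), (-1, -1), (-1, 1), (1, -1)]
--
--     def one(a, b):
--         return 0 <= a < n and 0 <= b < n and b < len(board[a]) and board[a][b] == 1
--
--     cnt = 0
--     for i in range(n):
--         for j in range(n):
--             if not one(i, j) and not any(one(i + di, j + dj) for di, dj in offs):
--                 cnt += 1
--     return cnt
-- ===== Notes on version B (the rewrite author's own statement) =====
-- stated objective: simpler
-- what changed: B replaces A's scatter-and-mark auxiliary n-by-n grid (mark every 1 and its in-bounds neighbours, then count the zeros) by a direct gather: for each cell of the n-by-n index square it checks the cell and its 8 neighbours for a 1 and tallies safe cells, never allocating the grid.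
import Mathlib
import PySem

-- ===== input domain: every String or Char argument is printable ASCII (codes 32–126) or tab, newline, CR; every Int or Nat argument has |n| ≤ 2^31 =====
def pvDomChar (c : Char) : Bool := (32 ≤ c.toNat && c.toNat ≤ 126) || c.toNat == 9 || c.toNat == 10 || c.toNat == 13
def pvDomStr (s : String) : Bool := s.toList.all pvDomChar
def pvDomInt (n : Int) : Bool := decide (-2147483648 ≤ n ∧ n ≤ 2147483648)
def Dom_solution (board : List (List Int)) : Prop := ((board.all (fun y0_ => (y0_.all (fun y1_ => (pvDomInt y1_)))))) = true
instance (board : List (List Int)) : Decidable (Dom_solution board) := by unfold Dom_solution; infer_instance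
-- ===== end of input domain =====

-- B counts safe cells by reading each cell's 8-neighbourhood directly (a gather),
-- instead of A's scatter-and-mark auxiliary grid; simpler, no auxiliary grid.

-- ===== PORT A =====
-- neighbour directets (module constant `direct`)
def direct : List (Int × Int) := [(0,1),(0,-1),(1,0),(-1,0),(1,1),(-1,-1),(-1,1),(1,-1)]

-- maps[i][j] = 1 ; exact for the writes A performs inside Pre_solution (Python raises on a
-- column index ≥ len(board), which Pre_solution excludes; List.set is a no-op there)
def setOne (g : List (List Int)) (i j : Int) : List (List Int) :=
  g.modify i.toNat (fun row => row.set j.toNat 1)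

-- body of A's `if val2 == 1:` branch for the enumerated cell (a, b) with value v
def cellStep (n : Nat) (g : List (List Int)) (a b v : Int) : List (List Int) :=
  if v = 1 then
    direct.foldl (fun g d =>
      let ni := a + d.1
      let nj := b + d.2
      if 0 ≤ ni ∧ ni < (n : Int) ∧ 0 ≤ nj ∧ nj < (n : Int) then setOne g ni nj else g)
      (setOne g a b)
  else g

def solution (board : List (List Int)) : Int :=
  let n := board.length
  let maps0 : List (List Int) := List.replicate n (List.replicate n 0)
  let maps := (PySem.List.enumerate board 0).foldl (fun g p =>
    (PySem.List.enumerate p.2 0).foldl (fun g q => cellStep n g p.1 q.1 q.2) g) maps0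
  (maps.flatten.count 0 : Int)

-- ===== PORT B =====
-- board has a 1 at row a, column b (both tested against range(n), then the row length)
def bOne (board : List (List Int)) (a b : Int) : Bool :=
  decide (0 ≤ a) && decide (a < (board.length : Int)) && decide (0 ≤ b) &&
  decide (b < (board.length : Int)) &&
  decide (b < ((board.getD a.toNat []).length : Int)) &&
  ((board.getD a.toNat []).getD b.toNat 0 == 1)

def solution_alt (board : List (List Int)) : Int :=
  (PySem.List.pyRange 0 board.length 1).foldl (fun cnt i =>
    (PySem.List.pyRange 0 board.length 1).foldl (fun cnt j =>
      if ¬ bOne board i j = true ∧ ¬ (direct.any (fun d => bOne board (i + d.1) (j + d.2))) = true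
      then cnt + 1 else cnt) cnt) 0

-- ===== PRECONDITION & SPEC =====
-- Pre_ excludes exactly the boards on which A raises IndexError: a row holding a 1 at a
-- column index ≥ len(board) (A writes that 1 into its len(board)-wide grid).
def Pre_solution (board : List (List Int)) : Prop :=
  ∀ row ∈ board, ∀ j ∈ List.range row.length, board.length ≤ j → row.getD j 0 ≠ 1
instance (board : List (List Int)) : Decidable (Pre_solution board) := by
  unfold Pre_solution; infer_instance
def pvWitness_solution : List (List Int) := [[1, 0], [0, 0]]

def Spec_solution (board : List (List Int)) (out : Int) : Prop := out = solution_alt board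
instance (board : List (List Int)) (out : Int) : Decidable (Spec_solution board out) := by
  unfold Spec_solution; infer_instance

-- ===== CLAIM (what is proved, stated in full; the proofs are below) =====
def Claim_equal_solution : Prop :=
  ∀ (board : List (List Int)), Dom_solution board → Pre_solution board →
    Spec_solution board (solution board)

-- ===== LEMMAS AND PROOFS =====

-- the n×n grid whose (i, j) entry is the indicator of P
def gridOf (n : Nat) (P : Int → Int → Bool) : List (List Int) :=
  (List.range n).map (fun (i : Nat) => (List.range n).map (fun (j : Nat) => if P (i : Int) (j : Int) then (1:Int) else 0))

lemma gridOf_congr {n : Nat} {P Q : Int → Int → Bool}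
    (h : ∀ i j : Nat, i < n → j < n → P i j = Q i j) : gridOf n P = gridOf n Q := by
  unfold gridOf
  refine List.map_congr_left (fun i hi => List.map_congr_left (fun j hj => ?_))
  rw [h i j (List.mem_range.mp hi) (List.mem_range.mp hj)]

lemma setOne_gridOf (n : Nat) (P : Int → Int → Bool) (a b : Int) (ha : 0 ≤ a) (hb : 0 ≤ b) :
    setOne (gridOf n P) a b = gridOf n (fun i j => P i j || (a == i && b == j)) := by
  unfold setOne gridOf
  apply List.ext_getElem?
  intro k
  by_cases hk : k < n
  · rw [List.getElem?_modify]
    simp only [List.getElem?_map, List.getElem?_range hk, Option.map_some]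
    by_cases hka : k = a.toNat
    · subst hka
      have hae : a = ((a.toNat : Nat) : Int) := by omega
      simp only [Option.map_eq_map, Option.map_some, if_true]
      congr 1
      apply List.ext_getElem?
      intro m
      by_cases hm : m < n
      · rw [List.getElem?_set]
        simp only [List.length_map, List.length_range, List.getElem?_map, List.getElem?_range hm,
          Option.map_some, if_pos hm]
        by_cases hmb : m = b.toNat
        · subst hmb
          have hbe : b = ((b.toNat : Nat) : Int) := by omega
          rw [if_pos rfl]
          rw [← hae, ← hbe]
          rw [if_pos hm]
          simp
        · have hbf : (b == ((m : Nat) : Int)) = false := by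
            simp only [beq_eq_false_iff_ne, ne_eq]; omega
          rw [if_neg (fun h => hmb (Eq.symm h))]
          simp [hbf]
      · have h1 : n ≤ m := Nat.le_of_not_lt hm
        rw [List.getElem?_set]
        split_ifs with h2 h3
        · simp only [List.length_map, List.length_range] at h3; exact absurd (h2 ▸ h3) hm
        · simp [List.getElem?_eq_none_iff, h1]
        · simp [List.getElem?_eq_none_iff, h1]
    · have haf : (a == ((k : Nat) : Int)) = false := by
        simp only [beq_eq_false_iff_ne, ne_eq]; omega
      simp only [Option.map_eq_map, Option.map_some]
      rw [if_neg (fun h => hka (Eq.symm h))]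
      simp [haf]
  · have h1 : n ≤ k := Nat.le_of_not_lt hk
    rw [List.getElem?_modify]
    simp [List.getElem?_eq_none, h1]

def markOf (a b v i j : Int) : Bool :=
  v == 1 && ((a == i && b == j) || direct.any (fun d => a + d.1 == i && b + d.2 == j))

lemma foldl_mark (n : Nat) (ds : List (Int × Int)) (a b : Int) (P : Int → Int → Bool) :
    ds.foldl (fun g d =>
        let ni := a + d.1
        let nj := b + d.2
        if 0 ≤ ni ∧ ni < (n : Int) ∧ 0 ≤ nj ∧ nj < (n : Int) then setOne g ni nj else g)
      (gridOf n P)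
    = gridOf n (fun i j => P i j || ds.any (fun d => a + d.1 == i && b + d.2 == j)) := by
  induction ds generalizing P with
  | nil => simp
  | cons d ds ih =>
    simp only [List.foldl_cons, List.any_cons]
    by_cases hg : 0 ≤ a + d.1 ∧ a + d.1 < (n : Int) ∧ 0 ≤ b + d.2 ∧ b + d.2 < (n : Int)
    · rw [if_pos hg, setOne_gridOf n P _ _ hg.1 hg.2.2.1, ih]
      apply gridOf_congr
      intro i j _ _
      cases h1 : (a + d.1 == (i : Int)) <;> cases h2 : (b + d.2 == (j : Int)) <;>
        simp [h1, h2, Bool.or_assoc, Bool.or_comm, Bool.or_left_comm]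
    · rw [if_neg hg, ih]
      apply gridOf_congr
      intro i j hi hj
      have h1 : (a + d.1 == ((i : Nat) : Int) && b + d.2 == ((j : Nat) : Int)) = false := by
        rw [Bool.and_eq_false_iff]
        by_cases hq : a + d.1 = ((i : Nat) : Int)
        · right; simp only [beq_eq_false_iff_ne, ne_eq]; omega
        · left; simp only [beq_eq_false_iff_ne, ne_eq]; exact hq
      simp [h1]

lemma cellStep_gridOf (n : Nat) (P : Int → Int → Bool) (a b v : Int)
    (ha : 0 ≤ a) (hb : 0 ≤ b) :
    cellStep n (gridOf n P) a b v = gridOf n (fun i j => P i j || markOf a b v i j) := by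
  unfold cellStep markOf
  by_cases hv : v = 1
  · rw [if_pos hv, setOne_gridOf n P a b ha hb, foldl_mark]
    apply gridOf_congr
    intro i j _ _
    simp [hv, Bool.or_assoc]
  · rw [if_neg hv]
    have hvf : (v == 1) = false := by simpa using hv
    apply gridOf_congr
    intro i j _ _
    simp [hvf]

lemma foldl_cellStep (n : Nat) (ts : List (Int × Int × Int))
    (h : ∀ t ∈ ts, 0 ≤ t.1 ∧ 0 ≤ t.2.1) (P : Int → Int → Bool) :
    ts.foldl (fun g t => cellStep n g t.1 t.2.1 t.2.2) (gridOf n P)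
    = gridOf n (fun i j => P i j || ts.any (fun t => markOf t.1 t.2.1 t.2.2 i j)) := by
  induction ts generalizing P with
  | nil => simp
  | cons t ts ih =>
    simp only [List.foldl_cons, List.any_cons]
    rw [cellStep_gridOf n P t.1 t.2.1 t.2.2 (h t (by simp)).1 (h t (by simp)).2,
      ih (fun t ht => h t (by simp [ht]))]
    apply gridOf_congr
    intro i j _ _
    simp [Bool.or_assoc]

def cells (board : List (List Int)) : List (Int × Int × Int) :=
  (PySem.List.enumerate board 0).flatMap
    (fun p => (PySem.List.enumerate p.2 0).map (fun q => (p.1, q.1, q.2)))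

lemma mem_cells {board : List (List Int)} {t : Int × Int × Int} :
    t ∈ cells board ↔ ∃ (a : Nat) (ha : a < board.length) (b : Nat)
      (hb : b < board[a].length), t = ((a : Int), (b : Int), board[a][b]) := by
  unfold cells
  simp only [List.mem_flatMap, List.mem_map, PySem.List.mem_enumerate_iff]
  constructor
  · rintro ⟨p, ⟨a, ha, rfl⟩, q, ⟨b, hb, rfl⟩, rfl⟩
    exact ⟨a, ha, b, hb, by simp⟩
  · rintro ⟨a, ha, b, hb, rfl⟩
    exact ⟨((a : Int), board[a]), ⟨a, ha, by simp⟩, ((b : Int), board[a][b]), ⟨b, hb, by simp⟩, rfl⟩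

lemma solution_maps (board : List (List Int)) :
    (PySem.List.enumerate board 0).foldl (fun g p =>
        (PySem.List.enumerate p.2 0).foldl (fun g q => cellStep board.length g p.1 q.1 q.2) g)
      (List.replicate board.length (List.replicate board.length 0))
    = gridOf board.length
        (fun i j => (cells board).any (fun t => markOf t.1 t.2.1 t.2.2 i j)) := by
  have h0 : (List.replicate board.length (List.replicate board.length (0:Int)))
      = gridOf board.length (fun _ _ => false) := by
    unfold gridOf
    simp [List.map_const', List.eq_replicate_iff]
  have hflat : ∀ g0 : List (List Int), (PySem.List.enumerate board 0).foldl (fun g p =>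
        (PySem.List.enumerate p.2 0).foldl (fun g q => cellStep board.length g p.1 q.1 q.2) g) g0
      = (cells board).foldl (fun g t => cellStep board.length g t.1 t.2.1 t.2.2) g0 := by
    intro g0
    unfold cells
    rw [List.foldl_flatMap]
    congr 1
    funext g p
    rw [List.foldl_map]
  rw [h0, hflat, foldl_cellStep]
  · exact gridOf_congr (fun i j _ _ => by simp)
  · intro t ht
    rcases mem_cells.mp ht with ⟨a, ha, b, hb, rfl⟩
    constructor <;> simp

lemma bOne_spec (board : List (List Int)) (x y : Int) :
    bOne board x y = true ↔ ∃ (a b : Nat), x = (a : Int) ∧ y = (b : Int) ∧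
      b < board.length ∧ ∃ (ha : a < board.length) (hb : b < board[a].length),
        board[a][b] = 1 := by
  unfold bOne
  simp only [Bool.and_eq_true, decide_eq_true_eq, beq_iff_eq]
  constructor
  · rintro ⟨⟨⟨⟨⟨hx0, hxn⟩, hy0⟩, hyn⟩, hlen⟩, hval⟩
    have ha : x.toNat < board.length := by omega
    have hrow : board.getD x.toNat [] = board[x.toNat] := List.getD_eq_getElem _ _ ha
    rw [hrow] at hlen hval
    have hb : y.toNat < board[x.toNat].length := by omega
    refine ⟨x.toNat, y.toNat, by omega, by omega, by omega, ha, hb, ?_⟩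
    rw [List.getD_eq_getElem _ _ hb] at hval
    exact hval
  · rintro ⟨a, b, rfl, rfl, hbn, ha, hb, hval⟩
    have hrow : board.getD ((a : Int)).toNat [] = board[a] := by
      simp only [Int.toNat_natCast]
      exact List.getD_eq_getElem _ _ ha
    refine ⟨⟨⟨⟨⟨Int.natCast_nonneg a, by exact_mod_cast ha⟩, Int.natCast_nonneg b⟩, by exact_mod_cast hbn⟩, ?_⟩, ?_⟩
    · rw [hrow]; exact_mod_cast hb
    · rw [hrow]
      simp only [Int.toNat_natCast]
      rw [List.getD_eq_getElem _ _ hb]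
      exact hval

lemma mark_iff_bOne (board : List (List Int)) (hpre : Pre_solution board)
    (i j : Nat) (hi : i < board.length) (hj : j < board.length) :
    (cells board).any (fun t => markOf t.1 t.2.1 t.2.2 (i : Int) (j : Int))
    = (bOne board i j || direct.any (fun d => bOne board ((i : Int) + d.1) ((j : Int) + d.2))) := by
  have hcol : ∀ (a b : Nat) (ha : a < board.length) (hb : b < board[a].length),
      board[a][b] = 1 → b < board.length := by
    intro a b ha hb h1
    by_contra hge
    exact hpre board[a] (List.getElem_mem ha) b (List.mem_range.mpr hb) (by omega)
      (by rw [List.getD_eq_getElem _ _ hb]; exact h1)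
  have hsym : ∀ d ∈ direct, (-d.1, -d.2) ∈ direct := by decide
  have hsym' : ∀ d ∈ direct, (-d.1, -d.2) ∈ direct := by decide
  cases hrhs : (bOne board i j || direct.any (fun d => bOne board ((i : Int) + d.1) ((j : Int) + d.2)))
  · rw [Bool.or_eq_false_iff, List.any_eq_false] at hrhs
    obtain ⟨hc, hn⟩ := hrhs
    rw [List.any_eq_false]
    rintro t ht
    rcases mem_cells.mp ht with ⟨a, ha, b, hb, rfl⟩
    unfold markOf
    simp only [Bool.not_eq_true, Bool.and_eq_false_iff, Bool.or_eq_false_iff]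
    by_cases hv : board[a][b] = 1
    · right
      have hbn : b < board.length := hcol a b ha hb hv
      constructor
      · by_cases hai : ((a : Nat) : Int) = ((i : Nat) : Int)
        · right
          simp only [beq_eq_false_iff_ne, ne_eq]
          intro hbj
          have hai' : a = i := by exact_mod_cast hai
          have hbj' : b = j := by exact_mod_cast hbj
          apply absurd hc
          subst hai' hbj'
          simp only [Bool.not_eq_false]
          exact (bOne_spec board a b).mpr ⟨a, b, rfl, rfl, hbn, ha, hb, hv⟩
        · left; simpa using hai
      · rw [List.any_eq_false]
        rintro d hd
        simp only [Bool.not_eq_true, Bool.and_eq_false_iff]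
        by_cases hai : ((a : Nat) : Int) + d.1 = ((i : Nat) : Int)
        · right
          simp only [beq_eq_false_iff_ne, ne_eq]
          intro hbj
          refine absurd (hn _ (hsym' d hd)) ?_
          simp only [not_not]
          have e1 : ((i : Nat) : Int) + -d.1 = ((a : Nat) : Int) := by omega
          have e2 : ((j : Nat) : Int) + -d.2 = ((b : Nat) : Int) := by omega
          rw [e1, e2]
          exact (bOne_spec board a b).mpr ⟨a, b, rfl, rfl, hbn, ha, hb, hv⟩
        · left; simpa using hai
    · left; simpa using hv
  · rw [Bool.or_eq_true, List.any_eq_true] at hrhs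
    rw [List.any_eq_true]
    rcases hrhs with hc | ⟨d, hd, hb1⟩
    · rcases (bOne_spec board i j).mp hc with ⟨a, b, ea, eb, hbn, ha, hb, hv⟩
      have ea' : i = a := by exact_mod_cast ea
      have eb' : j = b := by exact_mod_cast eb
      subst ea' eb'
      refine ⟨((i : Int), (j : Int), board[i][j]), mem_cells.mpr ⟨i, ha, j, hb, rfl⟩, ?_⟩
      unfold markOf
      simp [hv]
    · rcases (bOne_spec board _ _).mp hb1 with ⟨a, b, ea, eb, hbn, ha, hb, hv⟩
      refine ⟨((a : Int), (b : Int), board[a][b]), mem_cells.mpr ⟨a, ha, b, hb, rfl⟩, ?_⟩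
      unfold markOf
      simp only [Bool.and_eq_true, Bool.or_eq_true, List.any_eq_true, beq_iff_eq]
      refine ⟨by simpa using hv, Or.inr ⟨(-d.1, -d.2), hsym d hd, ?_, ?_⟩⟩
      · simp only [beq_iff_eq]; omega
      · simp only [beq_iff_eq]; omega

lemma count_zero_row (n : Nat) (P : Int → Bool) :
    ((List.range n).map (fun (j : Nat) => if P (j : Int) then (1:Int) else 0)).count 0
    = (List.range n).countP (fun (j : Nat) => ! P (j : Int)) := by
  rw [List.count_eq_countP, List.countP_map]
  apply List.countP_congr
  intro j _
  by_cases h : P (j : Int) <;> simp [h]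

lemma pyRange_range (n : Nat) :
    PySem.List.pyRange 0 (n : Int) 1 = (List.range n).map (fun (k : Nat) => (k : Int)) := by
  rw [PySem.List.pyRange_zero_natCast]

lemma alt_eq_sum (board : List (List Int)) :
    solution_alt board
    = ((List.range board.length).map (fun (i : Nat) =>
        ((List.range board.length).countP (fun (j : Nat) =>
          !(bOne board (i : Int) (j : Int) ||
            direct.any (fun d => bOne board ((i : Int) + d.1) ((j : Int) + d.2))) ) : Int))).sum := by
  unfold solution_alt
  rw [pyRange_range, List.foldl_map]
  have hinner : ∀ (c : Int) (i : Nat),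
      ((List.range board.length).map (fun (k : Nat) => (k : Int))).foldl (fun cnt j =>
        if ¬ bOne board (i : Int) j = true ∧
            ¬ (direct.any (fun d => bOne board ((i : Int) + d.1) (j + d.2))) = true
        then cnt + 1 else cnt) c
      = c + ((List.range board.length).countP (fun (j : Nat) =>
          !(bOne board (i : Int) (j : Int) ||
            direct.any (fun d => bOne board ((i : Int) + d.1) ((j : Int) + d.2))) ) : Int) := by
    intro c i
    rw [List.foldl_map, PySem.List.foldl_ite_add_one]
    congr 2
    apply List.countP_congr
    intro j _
    cases h1 : bOne board (i : Int) (j : Int) <;>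
      cases h2 : direct.any (fun d => bOne board ((i : Int) + d.1) ((j : Int) + d.2)) <;>
      simp [h1, h2]
  calc (List.range board.length).foldl (fun cnt (i : Nat) =>
        ((List.range board.length).map (fun (k : Nat) => (k : Int))).foldl (fun cnt j =>
          if ¬ bOne board (i : Int) j = true ∧
              ¬ (direct.any (fun d => bOne board ((i : Int) + d.1) (j + d.2))) = true
          then cnt + 1 else cnt) cnt) 0
      = (List.range board.length).foldl (fun cnt (i : Nat) =>
          cnt + ((List.range board.length).countP (fun (j : Nat) =>
            !(bOne board (i : Int) (j : Int) ||
              direct.any (fun d => bOne board ((i : Int) + d.1) ((j : Int) + d.2))) ) : Int)) 0 := by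
        apply PySem.List.foldl_congr_mem
        intro cnt i _
        exact hinner cnt i
    _ = _ := by
        rw [PySem.List.foldl_add]
        simp

theorem sol_eq (board : List (List Int)) (hpre : Pre_solution board) :
    solution board = solution_alt board := by
  have hA : solution board
      = ((gridOf board.length (fun i j =>
          (cells board).any (fun t => markOf t.1 t.2.1 t.2.2 i j))).flatten.count 0 : Int) := by
    show ((((PySem.List.enumerate board 0).foldl (fun g p =>
      (PySem.List.enumerate p.2 0).foldl (fun g q => cellStep board.length g p.1 q.1 q.2) g)
      (List.replicate board.length (List.replicate board.length 0))).flatten.count 0 : Nat) : Int)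
      = _
    rw [solution_maps]
  have hcount : (gridOf board.length (fun i j =>
        (cells board).any (fun t => markOf t.1 t.2.1 t.2.2 i j))).flatten.count 0
      = ((List.range board.length).map (fun (i : Nat) =>
          (List.range board.length).countP (fun (j : Nat) =>
            ! (cells board).any (fun t => markOf t.1 t.2.1 t.2.2 (i : Int) (j : Int))))).sum := by
    unfold gridOf
    rw [List.count_flatten, List.map_map]
    apply congrArg List.sum
    apply List.map_congr_left
    intro i _
    simp only [Function.comp]
    exact count_zero_row board.length
      (fun x => (cells board).any (fun t => markOf t.1 t.2.1 t.2.2 (i : Int) x))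
  rw [hA, hcount, alt_eq_sum]
  push_cast
  rw [List.map_map]
  apply congrArg List.sum
  apply List.map_congr_left
  intro i hi
  simp only [Function.comp]
  congr 1
  apply List.countP_congr
  intro j hj
  rw [mark_iff_bOne board hpre i j (List.mem_range.mp hi) (List.mem_range.mp hj)]

-- ===== VERDICT (by name: the statement is the Claim_ definition above) =====
theorem solution_spec : Claim_equal_solution := by
  intro board _ hpre
  unfold Spec_solution
  exact sol_eq board hpre
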